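-- pv_equiv track=rewrite | github.com/studentUnk/Crypto | aes.py | xorFila
-- ===== SOURCE A (Python) =====
-- def hexadecimalBinario(texto, tam = 4):
--  formato = "{0:0" + str(tam) +"b}" # Formato de salida
--  binario = ""
--  for t in texto:
--   binario = binario + formato.format(int(t,16)) # Convertir a binario y agregar
--  return binario
--
-- def binarioEntero(binario):
--  return int(binario,2)
--
-- def binarioHexadecimal(binario):
--  hexadecimal = ""
--  formato = "{0:x}"
--  for i in range(0,len(binario),4):
--   hexadecimal = hexadecimal + formato.format(binarioEntero(binario[i:i+4])) # Convertir binario a hexadecimal y agregar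
--  return hexadecimal
--
-- def xor(b1,b2):
--  if(b1 != b2):
--   return "1"
--  return "0"
--
-- def xorFila(fila1, fila2):
--  filaR = []
--  for i in range(0,len(fila1)):
--   bin1 = hexadecimalBinario(fila1[i]) #Convertir a binarios para operacion xor
--   bin2 = hexadecimalBinario(fila2[i])
--   binR = ""
--   for j in range(0,len(bin1)):
--    binR = binR + xor(bin1[j],bin2[j]) # Operacion xor
--   filaR.append(binarioHexadecimal(binR)) #Convertir a hexadecimal y agregar
--  return filaR
-- ===== SOURCE B (Python) =====
-- def xorFila(fila1, fila2):
--     filaR = []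
--     for s1, s2 in zip(fila1, fila2):
--         filaR.append("".join(format(int(c1, 16) ^ int(c2, 16), "x")
--                              for c1, c2 in zip(s1, s2)))
--     return filaR
-- ===== Notes on version B (the rewrite author's own statement) =====
-- stated objective: simpler
-- what changed: Replaced the hex-to-binary-string conversion, per-bit character XOR loop and binary-to-hex reassembly by a single zip pass that XORs each pair of hex digits as integers and formats the nibble back to one hex char.
import Mathlib
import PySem

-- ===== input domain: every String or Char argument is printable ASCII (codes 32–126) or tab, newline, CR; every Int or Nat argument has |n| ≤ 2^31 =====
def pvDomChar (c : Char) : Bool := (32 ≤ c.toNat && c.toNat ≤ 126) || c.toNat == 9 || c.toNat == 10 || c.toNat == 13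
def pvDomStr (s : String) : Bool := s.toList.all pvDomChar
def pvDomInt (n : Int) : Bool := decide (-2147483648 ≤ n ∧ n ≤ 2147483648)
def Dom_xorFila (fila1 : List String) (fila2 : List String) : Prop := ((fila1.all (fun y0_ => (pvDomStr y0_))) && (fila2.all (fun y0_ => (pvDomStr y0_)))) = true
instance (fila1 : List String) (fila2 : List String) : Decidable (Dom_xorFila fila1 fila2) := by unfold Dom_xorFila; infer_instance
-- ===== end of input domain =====

-- B replaces A's hex→binary-string→per-bit-char-XOR→binary→hex pipeline by one zip pass that
-- XORs each pair of hex digits as integers; objective: simpler.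


-- ===== PORT A =====

-- int(t, 16) for a single character t; Python raises ValueError on a non-hex character —
-- those inputs are excluded by Pre_xorFila (the port returns 0 there).
def hexVal (t : Char) : Int := (PySem.Int.ofCharsBase? [t] 16).getD 0

-- ("{0:0" + str(tam) + "b}").format(n): binary digits of n zero-padded to width tam
-- (exact for n ≥ 0, the only values int(t,16) produces).
def fmtBin (tam : Nat) (n : Int) : List Char :=
  let s := PySem.Int.toBinChars n
  List.replicate (tam - s.length) '0' ++ s

def hexadecimalBinario (texto : String) (tam : Nat) : List Char :=
  texto.toList.foldl (fun binario t => binario ++ fmtBin tam (hexVal t)) []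

-- int(binario, 2); Python raises on the empty/non-binary string — never reached inside Pre_xorFila.
def binarioEntero (binario : List Char) : Int := (PySem.Int.ofCharsBase? binario 2).getD 0

-- "{0:x}".format(v) (exact for v ≥ 0, the only values reached: int(_, 2) is nonnegative).
def fmtHex (v : Int) : List Char := Nat.toDigits 16 v.toNat

def binarioHexadecimal (binario : List Char) : List Char :=
  (PySem.List.pyRange 0 binario.length 4).foldl
    (fun hexadecimal i =>
      hexadecimal ++ fmtHex (binarioEntero (PySem.List.slice binario (some i) (some (i + 4))))) []

def xorBit (b1 b2 : Char) : Char := if b1 ≠ b2 then '1' else '0'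

-- bin2[j] raises IndexError in Python when fila2[i] is shorter than fila1[i], as does fila2[i]
-- for a short fila2 — both excluded by Pre_xorFila (pyGetD's default is only reached outside Pre_).
def xorFila (fila1 : List String) (fila2 : List String) : List String :=
  (PySem.List.pyRange 0 fila1.length 1).foldl (fun filaR i =>
    let bin1 := hexadecimalBinario (PySem.List.pyGetD fila1 i "") 4
    let bin2 := hexadecimalBinario (PySem.List.pyGetD fila2 i "") 4
    let binR := (PySem.List.pyRange 0 bin1.length 1).foldl
      (fun binR j => binR ++ [xorBit (PySem.List.pyGetD bin1 j ' ') (PySem.List.pyGetD bin2 j ' ')]) []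
    filaR ++ [String.ofList (binarioHexadecimal binR)]) []

-- ===== PORT B =====

-- for s1, s2 in zip(fila1, fila2): append "".join(format(int(c1,16) ^ int(c2,16), 'x') for c1, c2 in zip(s1, s2))
def xorFila_alt (fila1 : List String) (fila2 : List String) : List String :=
  (fila1.zip fila2).map (fun p =>
    String.ofList (((p.1.toList.zip p.2.toList).map
      (fun q => fmtHex (PySem.Int.bxor (hexVal q.1) (hexVal q.2)))).flatten))

-- ===== PRECONDITION & SPEC =====

def isHexChar (c : Char) : Bool :=
  (48 ≤ c.toNat && c.toNat ≤ 57) || (97 ≤ c.toNat && c.toNat ≤ 102) || (65 ≤ c.toNat && c.toNat ≤ 70)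

-- Pre_ = exactly the inputs where A returns: fila2 at least as long as fila1 (else IndexError),
-- every character of every used element a hex digit (else ValueError from int(t, 16)),
-- and each fila2[i] at least as long as fila1[i] (else IndexError at bin2[j]).
def Pre_xorFila (fila1 : List String) (fila2 : List String) : Prop :=
  fila1.length ≤ fila2.length ∧
  ((fila1.zip fila2).all (fun p =>
    p.1.toList.all isHexChar && p.2.toList.all isHexChar &&
    decide (p.1.toList.length ≤ p.2.toList.length))) = true

instance (fila1 : List String) (fila2 : List String) : Decidable (Pre_xorFila fila1 fila2) := by
  unfold Pre_xorFila; infer_instance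

def pvWitness_xorFila : List String × List String := (["ab", "F"], ["0f", "1"])

def Spec_xorFila (fila1 : List String) (fila2 : List String) (out : List String) : Prop := out = xorFila_alt fila1 fila2
instance (fila1 : List String) (fila2 : List String) (out : List String) : Decidable (Spec_xorFila fila1 fila2 out) := by unfold Spec_xorFila; infer_instance

-- ===== CLAIM (what is proved, stated in full; the proofs are below) =====
def Claim_equal_xorFila : Prop := ∀ (fila1 : List String) (fila2 : List String), Dom_xorFila fila1 fila2 → Pre_xorFila fila1 fila2 → Spec_xorFila fila1 fila2 (xorFila fila1 fila2)

-- ===== LEMMAS AND PROOFS =====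

-- the 22 hex-digit characters
def hexChars : List Char :=
  ['0','1','2','3','4','5','6','7','8','9','a','b','c','d','e','f','A','B','C','D','E','F']

lemma ofNat_mem_dig (n : Nat) (h1 : 48 ≤ n) (h2 : n ≤ 57) : Char.ofNat n ∈ hexChars := by
  interval_cases n <;> decide

lemma ofNat_mem_low (n : Nat) (h1 : 97 ≤ n) (h2 : n ≤ 102) : Char.ofNat n ∈ hexChars := by
  interval_cases n <;> decide

lemma ofNat_mem_up (n : Nat) (h1 : 65 ≤ n) (h2 : n ≤ 70) : Char.ofNat n ∈ hexChars := by
  interval_cases n <;> decide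

lemma mem_hexChars {c : Char} (h : isHexChar c = true) : c ∈ hexChars := by
  unfold isHexChar at h
  simp only [Bool.or_eq_true, Bool.and_eq_true, decide_eq_true_eq] at h
  rw [← Char.ofNat_toNat c]
  exact h.elim (fun h => h.elim (fun h => ofNat_mem_dig _ h.1 h.2) (fun h => ofNat_mem_low _ h.1 h.2))
    (fun h => ofNat_mem_up _ h.1 h.2)

-- per-nibble facts, checked over all hex-digit pairs by decide
lemma fmtBin_len {c : Char} (h : isHexChar c = true) : (fmtBin 4 (hexVal c)).length = 4 := by
  have key : (hexChars.all fun c => decide ((fmtBin 4 (hexVal c)).length = 4)) = true := by decide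
  have := List.all_eq_true.mp key c (mem_hexChars h)
  exact of_decide_eq_true this

lemma nibble_xor {c d : Char} (hc : isHexChar c = true) (hd : isHexChar d = true) :
    fmtHex (binarioEntero (List.zipWith xorBit (fmtBin 4 (hexVal c)) (fmtBin 4 (hexVal d))))
      = fmtHex (PySem.Int.bxor (hexVal c) (hexVal d)) := by
  have key : (hexChars.all fun c => hexChars.all fun d => decide
      (fmtHex (binarioEntero (List.zipWith xorBit (fmtBin 4 (hexVal c)) (fmtBin 4 (hexVal d))))
        = fmtHex (PySem.Int.bxor (hexVal c) (hexVal d)))) = true := by decide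
  have := List.all_eq_true.mp (List.all_eq_true.mp key c (mem_hexChars hc)) d (mem_hexChars hd)
  exact of_decide_eq_true this

-- hexadecimalBinario as a flatMap
def hbL (l : List Char) : List Char := l.flatMap (fun t => fmtBin 4 (hexVal t))

lemma hexadecimalBinario_eq (s : String) : hexadecimalBinario s 4 = hbL s.toList := by
  unfold hexadecimalBinario hbL
  exact PySem.List.foldl_append_eq_flatMap _ _ []

lemma hbL_length {l : List Char} (h : l.all isHexChar = true) : (hbL l).length = 4 * l.length := by
  induction l with
  | nil => rfl
  | cons c cs ih =>
    simp only [List.all_cons, Bool.and_eq_true] at h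
    simp only [hbL, List.flatMap_cons, List.length_append, List.length_cons]
    rw [fmtBin_len h.1]
    have := ih h.2
    simp only [hbL] at this
    omega

-- the inner j-loop is a map over indices
lemma range_map_getD_eq_zipWith (b1 b2 : List Char) (h : b1.length ≤ b2.length) :
    (List.range b1.length).map (fun k => xorBit (b1.getD k ' ') (b2.getD k ' '))
      = List.zipWith xorBit b1 b2 := by
  induction b1 generalizing b2 with
  | nil => simp
  | cons c cs ih =>
    cases b2 with
    | nil => simp at h
    | cons d ds =>
      simp only [List.length_cons, List.range_succ_eq_map, List.map_cons, List.map_map,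
        List.zipWith_cons_cons]
      refine congrArg₂ _ rfl ?_
      rw [← ih ds (by simpa using h)]
      rfl

lemma inner_loop_eq (b1 b2 : List Char) (h : b1.length ≤ b2.length) :
    (PySem.List.pyRange 0 b1.length 1).foldl
      (fun binR j => binR ++ [xorBit (PySem.List.pyGetD b1 j ' ') (PySem.List.pyGetD b2 j ' ')]) []
    = List.zipWith xorBit b1 b2 := by
  rw [PySem.List.foldl_append_singleton_eq_map, List.nil_append,
    PySem.List.pyRange_zero_natCast, List.map_map]
  rw [← range_map_getD_eq_zipWith b1 b2 h]
  refine List.map_congr_left fun k hk => ?_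
  simp [Function.comp, PySem.List.pyGetD_natCast]

-- binarioHexadecimal as a flatMap over range(0, len, 4)
lemma bh_eq_flatMap (x : List Char) :
    binarioHexadecimal x = (PySem.List.pyRange 0 x.length 4).flatMap
      (fun i => fmtHex (binarioEntero (PySem.List.slice x (some i) (some (i + 4))))) := by
  unfold binarioHexadecimal
  exact PySem.List.foldl_append_eq_flatMap _ _ []

lemma pyRange4_len (m : Nat) :
    PySem.List.pyRange 0 ((4 + m : Nat) : Int) 4
      = 0 :: (PySem.List.pyRange 0 (m : Int) 4).map (· + 4) := by
  rw [PySem.List.pyRange_of_pos _ _ (by norm_num), PySem.List.pyRange_of_pos _ _ (by norm_num)]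
  have h4 : (0:Int) < ((4 + m : Nat) : Int) := by positivity
  rw [if_pos h4]
  have hb : ((((4 + m : Nat) : Int) - 0 + 4 - 1) / 4).toNat = (m + 7) / 4 := by omega
  rw [hb]
  by_cases hm : (0:Int) < (m : Int)
  · rw [if_pos hm]
    have hc : (((m:Int) - 0 + 4 - 1) / 4).toNat = (m + 3) / 4 := by omega
    rw [hc]
    have hk : (m + 7) / 4 = (m + 3) / 4 + 1 := by omega
    rw [hk, List.range_succ_eq_map]
    simp only [List.map_cons, List.map_map]
    refine congrArg₂ _ (by ring) ?_
    refine List.map_congr_left fun k _ => ?_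
    simp only [Function.comp]
    push_cast; ring
  · rw [if_neg hm]
    have hm' : m = 0 := by omega
    subst hm'
    have : (0 + 7) / 4 = 1 := by norm_num
    rw [this, List.range_succ_eq_map]
    simp

-- peel one 4-char block off binarioHexadecimal
lemma binarioHexadecimal_chunk (b4 rest : List Char) (h : b4.length = 4) :
    binarioHexadecimal (b4 ++ rest) = fmtHex (binarioEntero b4) ++ binarioHexadecimal rest := by
  rw [bh_eq_flatMap, bh_eq_flatMap]
  have hlen : (b4 ++ rest).length = 4 + rest.length := by simp [h]
  rw [hlen, pyRange4_len rest.length]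
  rw [List.flatMap_cons, List.flatMap_map]
  congr 1
  · have h0 : PySem.List.slice (b4 ++ rest) (some ((0:Nat):Int)) (some ((4:Nat):Int)) = b4 := by
      rw [PySem.List.slice_natCast]; simpa using List.take_left' h
    have e0 : ((0:Nat):Int) = (0:Int) := rfl
    have e4 : ((4:Nat):Int) = (0:Int) + 4 := rfl
    rw [e0, e4] at h0
    rw [h0]
  · refine List.flatMap_congr fun i hi => ?_
    have hnn : 0 ≤ i := ((PySem.List.mem_pyRange_iff_of_pos (by norm_num : (0:Int) < 4) i).mp hi).1
    obtain ⟨k, rfl⟩ := Int.eq_ofNat_of_zero_le hnn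
    have e1 : ((k:Int) + 4) = ((k + 4 : Nat) : Int) := by push_cast; ring
    have e2 : (((k + 4 : Nat) : Int) + 4) = ((k + 8 : Nat) : Int) := by push_cast; ring
    rw [e1, e2, PySem.List.slice_natCast, PySem.List.slice_natCast]
    rw [List.drop_append]
    have hd : List.drop (k + 4) b4 = [] := by
      apply List.drop_of_length_le; omega
    rw [hd, List.nil_append, h]
    have e3 : k + 4 - 4 = k := by omega
    rw [e3]
    have e5 : k + 8 - (k + 4) = k + 4 - k := by omega
    rw [e5]

-- the per-element equivalence
lemma pair_eq (l1 l2 : List Char) (h1 : l1.all isHexChar = true) (h2 : l2.all isHexChar = true)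
    (hlen : l1.length ≤ l2.length) :
    binarioHexadecimal (List.zipWith xorBit (hbL l1) (hbL l2))
      = (l1.zip l2).flatMap (fun q => fmtHex (PySem.Int.bxor (hexVal q.1) (hexVal q.2))) := by
  induction l1 generalizing l2 with
  | nil =>
    simp only [hbL, List.flatMap_nil, List.zipWith_nil_left, List.zip_nil_left]
    rfl
  | cons c cs ih =>
    cases l2 with
    | nil => simp at hlen
    | cons d ds =>
      simp only [List.all_cons, Bool.and_eq_true] at h1 h2
      have hc := h1.1
      have hd := h2.1
      simp only [hbL, List.flatMap_cons]
      rw [List.zipWith_append (by rw [fmtBin_len hc, fmtBin_len hd])]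
      have hz4 : (List.zipWith xorBit (fmtBin 4 (hexVal c)) (fmtBin 4 (hexVal d))).length = 4 := by
        rw [List.length_zipWith, fmtBin_len hc, fmtBin_len hd]; rfl
      rw [binarioHexadecimal_chunk _ _ hz4]
      rw [nibble_xor hc hd]
      have := ih ds h1.2 h2.2 (by simpa using hlen)
      simp only [hbL] at this
      rw [this]
      simp [List.zip_cons_cons]

-- ===== VERDICT (by name: the statement is the Claim_ definition above) =====
theorem xorFila_spec : Claim_equal_xorFila := by
  intro fila1 fila2 _hdom hpre
  obtain ⟨hlen, hall⟩ := hpre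
  unfold Spec_xorFila xorFila xorFila_alt
  rw [PySem.List.foldl_append_singleton_eq_map, List.nil_append,
    PySem.List.pyRange_zero_natCast, List.map_map]
  apply List.ext_getElem
  · simp [List.length_zip]; omega
  · intro k hk1 hk2
    simp only [List.getElem_map, List.getElem_range, Function.comp]
    have hk : k < fila1.length := by simpa using hk1
    have hk2' : k < fila2.length := lt_of_lt_of_le hk hlen
    have hg1 : PySem.List.pyGetD fila1 (k : Nat) "" = fila1[k] := by
      rw [PySem.List.pyGetD_natCast]; exact List.getD_eq_getElem _ _ hk
    have hg2 : PySem.List.pyGetD fila2 (k : Nat) "" = fila2[k] := by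
      rw [PySem.List.pyGetD_natCast]; exact List.getD_eq_getElem _ _ hk2'
    rw [hg1, hg2, hexadecimalBinario_eq, hexadecimalBinario_eq]
    have hkz : k < (fila1.zip fila2).length := by
      rw [List.length_zip]; omega
    have hmem : (fila1[k], fila2[k]) ∈ fila1.zip fila2 := by
      have h' : (fila1.zip fila2)[k]'hkz = (fila1[k], fila2[k]) := List.getElem_zip ..
      rw [← h']; exact List.getElem_mem _
    have hp := List.all_eq_true.mp hall _ hmem
    simp only [Bool.and_eq_true, decide_eq_true_eq] at hp
    obtain ⟨⟨ha1, ha2⟩, hlp⟩ := hp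
    have hb12 : (hbL (fila1[k]).toList).length ≤ (hbL (fila2[k]).toList).length := by
      rw [hbL_length ha1, hbL_length ha2]; omega
    rw [inner_loop_eq _ _ hb12]
    rw [pair_eq _ _ ha1 ha2 hlp]
    have hzk : (fila1.zip fila2)[k]'hkz = (fila1[k], fila2[k]) := List.getElem_zip ..
    rw [hzk]
    rw [List.flatMap_def]
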